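/- GENERATED by mk_final_copies.py from the proof of the farm's unit `start_decoder.F3` (farm:start_decoder.F3.1: Lemmas.lean) as the
   re-elaboration sweep compiled it — do not edit. -/
import Vorbis.Spec.StartDecoderB
import Vorbis.Spec.StartDecoderBTest
import Vorbis.Spec.Reader

/-
  Unit start_decoder.F3 — THE PURE PART (no machine walk): the point the segment carries from one callee return to the next
  (`Pt`: the memory-dependent fields of `Frame`, `Mid g 5 5 6`, the floor block and its two fields), and the ONE frame lemma
  (`Pt.carry`) that takes it over a batch of stores / a callee's footprint whose windows are below the steady stack pointer, in
  the bit reader's / `error`'s fields of `*f`, or inside the floor element under construction.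
-/
namespace Vorbis.Spec.start_decoder_F3
open X86 X86.User Asan Vorbis Vorbis.Spec Vorbis.Spec.StartDecoder

/-- **A window a step of the segment may write**: the stack below the steady stack pointer `R` (the pushes of return addresses,
the callees' frames), the bit reader's fields of `*f` (`Reader.winsBits`; `error`'s `[140, 144)` lies in the third), or the floor
element `[ge, ge + 1596)` under construction. -/
def WinOK (g : Ghost) (ge : Nat) (w : Span) : Prop :=
  (g.RA - 1888 ≤ w.lo ∧ w.hi ≤ g.R) ∨
  (g.f + 48 ≤ w.lo ∧ w.hi ≤ g.f + 56) ∨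
  (g.f + 84 ≤ w.lo ∧ w.hi ≤ g.f + 96) ∨
  (g.f + 136 ≤ w.lo ∧ w.hi ≤ g.f + 144) ∨
  (g.f + 1484 ≤ w.lo ∧ w.hi ≤ g.f + 1749) ∨
  (g.f + 1752 ≤ w.lo ∧ w.hi ≤ g.f + 1784) ∨
  (ge ≤ w.lo ∧ w.hi ≤ ge + 1596)

/-- **A window off `*f`**: the stack below `R`, or the floor element. A batch of such stores keeps `Bits f`. -/
def WinOff (g : Ghost) (ge : Nat) (w : Span) : Prop :=
  (g.RA - 1888 ≤ w.lo ∧ w.hi ≤ g.R) ∨ (ge ≤ w.lo ∧ w.hi ≤ ge + 1596)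

/-- A window off `*f` is a window of the segment. -/
theorem WinOff.ok {g : Ghost} {ge : Nat} {w : Span} (h : WinOff g ge w) : WinOK g ge w := by
  rcases h with h1 | h2
  · exact Or.inl h1
  · exact Or.inr (Or.inr (Or.inr (Or.inr (Or.inr (Or.inr h2)))))

/-- **THE POINT INSIDE SEGMENT F3**, for the memory `mem`: what `Frame` says of the memory (the saved registers, the return
address, the shadow index, the shadow layer, SH7, the footprint since the entry), the memory-independent part of `Frame` and
`hand`, the invariant inside the floor section (`Mid g 5 5 6`), and the floor block: `floor_config = fc`, `floor_count = n`, a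
block allocated since `A5`, `i < n`. -/
structure Pt (u₀ : State) (g : Ghost) (i : Nat) (A5 : Arena) (A : Arena × List Obj) (fc : Nat) (n : Int) (mem : Mem) :
    Prop where
  entry : AtEntry (conv u₀) L.start_decoder.entry depth g.ret g.e
  hand : g.Hand A
  offText : ∀ o, o ∈ A.2 → L.textHi ≤ o.base
  ext : g.A0.1.Extends A.1
  callers : ∀ bF, bF ∈ g.frames → g.RA + 8 ≤ bF.1
  shadowIdx : mem.u64 (g.R + 8) = (g.R + 0x50) / 8
  saved_rbx : mem.u64 (g.R + 0x598) = (g.e.reg .rbx).toNat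
  saved_rbp : mem.u64 (g.R + 0x5a0) = (g.e.reg .rbp).toNat
  saved_r12 : mem.u64 (g.R + 0x5a8) = (g.e.reg .r12).toNat
  saved_r13 : mem.u64 (g.R + 0x5b0) = (g.e.reg .r13).toNat
  saved_r14 : mem.u64 (g.R + 0x5b8) = (g.e.reg .r14).toNat
  saved_r15 : mem.u64 (g.R + 0x5c0) = (g.e.reg .r15).toNat
  saved_ra : mem.u64 (g.R + 0x5c8) = g.ret.toNat
  shadow : ShadowInv A.2 g.frames' g.R mem
  sh7 : Log2_4In mem
  same : Mem.SameExcept (footprint g) g.e.mem mem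
  mid : Mid g 5 5 6 A5 A mem
  cfg : stb_vorbis.floor_config mem g.f = fc
  cnt : stb_vorbis.floor_count mem g.f = n
  blk : Since A5 A.1 ⟨fc, 1596 * n.toNat⟩
  lt : (i : Int) < n

/-- The point at the segment's entry, from the entry assertion. -/
theorem Pt.of_body {u₀ : State} {g : Ghost} {i : Nat} {A5 : Arena} {A : Arena × List Obj} {v : State}
    (h : BodyF3 u₀ g i A5 A v) :
    Pt u₀ g i A5 A (stb_vorbis.floor_config v.mem g.f) (stb_vorbis.floor_count v.mem g.f) v.mem := by
  have hf := h.loop.frame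
  have hb := h.loop.floors.FL2
  simp only [floorBlock, voff] at hb
  exact
    { entry := hf.entry, hand := h.loop.hand, offText := hf.offText, ext := hf.ext, callers := hf.callers,
      shadowIdx := hf.shadowIdx, saved_rbx := hf.saved_rbx, saved_rbp := hf.saved_rbp, saved_r12 := hf.saved_r12,
      saved_r13 := hf.saved_r13, saved_r14 := hf.saved_r14, saved_r15 := hf.saved_r15, saved_ra := hf.saved_ra,
      shadow := hf.shadow, sh7 := hf.sh7, same := hf.same, mid := h.loop.mid, cfg := rfl, cnt := rfl, blk := hb, lt := h.lt }

variable {u₀ : State} {g : Ghost} {i : Nat} {A5 : Arena} {A : Arena × List Obj} {fc : Nat} {n : Int} {mem mem' : Mem}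

/-- **Where everything is**, as arithmetic: the stack (`R + 1480 = RA`, inside `[700000H, 800000H)`), `*f` (off the function's
stack and the return-address slot; in `[400000H, C00000H)`; outside the arena), the floor block (inside the arena, off the stack),
the element `i` inside the block. -/
theorem Pt.where_ (h : Pt u₀ g i A5 A fc n mem) :
    (g.R + 1480 = g.RA ∧ g.R % 8 = 0 ∧ 0x700000 + 1888 ≤ g.RA ∧ g.RA + 8 ≤ 0x800000) ∧
    ((g.RA + 8 ≤ g.f ∨ g.f + 1808 ≤ 0x700000 ∨ 0x800000 ≤ g.f) ∧ 0x400000 ≤ g.f ∧ g.f + 1808 ≤ 0xC00000 ∧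
      (g.f + 1808 ≤ A.1.B ∨ A.1.B + A.1.L ≤ g.f)) ∧
    (A.1.B ≤ fc ∧ fc + 1596 * n.toNat ≤ A.1.B + A.1.L ∧ A.1.B + A.1.L ≤ 0xC00000 ∧ 0x119d40 ≤ A.1.B ∧
      (fc + 1596 * n.toNat ≤ 0x700000 ∨ 0x800000 ≤ fc)) ∧
    (fc + 1596 * i + 1596 ≤ fc + 1596 * n.toNat) := by
  have hroom : 0x700000 + 1888 ≤ g.RA := h.entry.room
  have htop : g.RA + 8 ≤ 0x800000 := h.entry.top
  have hal : g.RA % 8 = 0 := h.entry.align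
  have hR : g.R = g.RA - 1480 := rfl
  have hobr := h.mid.bits.OBR
  have hout := h.hand.objOut
  simp only [voff] at hobr hout
  have hin := arena_inside h.mid.arena h.blk.1
  have hoff := h.mid.arena.blk_off_stack h.blk.1
  have hb := h.mid.arena.bounds
  have htext : L.textHi ≤ A.1.B := h.hand.arenaText
  have etext : L.textHi = 0x119d40 := rfl
  simp only [] at hin hoff
  have hlt := h.lt
  have hobj : g.RA + 8 ≤ g.f ∨ g.f + 1808 ≤ 0x700000 ∨ 0x800000 ≤ g.f := by
    obtain ⟨o, ho, k1, k2⟩ := h.hand.obj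
    simp only [voff] at k2
    rcases List.mem_append.mp ho with hs | hoth
    · unfold stackObjs at hs
      obtain ⟨bF, hbF, hin'⟩ := List.mem_flatMap.mp hs
      obtain ⟨fo, _, rfl⟩ := FrameLayout.mem_objsAt hin'
      have := h.callers bF hbF
      simp only [] at k1
      omega
    · have := h.shadow.off o hoth
      unfold OffStack at this
      omega
  refine ⟨⟨by omega, by omega, hroom, htop⟩, ⟨hobj, hobr.1, hobr.2, hout⟩, ⟨hin.1, hin.2, hb.2.2.2, by omega, hoff⟩, ?_⟩
  omega

/-- **THE FRAME LEMMA OF THE SEGMENT**: the point is carried over a callee's footprint / a batch of stores `ws` whose windows are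
windows of the segment (`WinOK`), when no shadow byte was written and `Bits f` holds in the new memory (the reader's post, or
`Pt.bits_off` for stores off `*f`). -/
theorem Pt.carry (h : Pt u₀ g i A5 A fc n mem) {ws : List Span} (hs : Mem.SameExcept ws mem mem')
    (hun : ShadowUntouched mem mem') (hbits : Bits (g.Blk A) g.len mem' g.f)
    (hws : ∀ w, w ∈ ws → WinOK g (fc + 1596 * i) w) : Pt u₀ g i A5 A fc n mem' := by
  obtain ⟨⟨r1, r2, r3, r4⟩, ⟨f1, f2, f3, f4⟩, ⟨c1, c2, c3, c4, c5⟩, c6⟩ := h.where_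
  -- the function's own stack `[R, RA + 8)` reads the same
  have hE : Mem.EqOn g.R (g.RA + 8) mem mem' := by
    apply hs.eqOn
    intro w hw
    rcases hws w hw with k | k | k | k | k | k | k <;> omega
  -- the fields of the floor section in `*f` read the same
  have hF : Mem.EqOn (g.f + 176) (g.f + 320) mem mem' := by
    apply hs.eqOn
    intro w hw
    rcases hws w hw with k | k | k | k | k | k | k <;> omega
  have hR64 : g.RA + 8 ≤ 2 ^ 64 := by omega
  have ecfg : stb_vorbis.floor_config mem' g.f = stb_vorbis.floor_config mem g.f := by
    simp only [vacc, voff]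
    exact hF.u64 _ (by omega) (by omega) (by omega)
  have ecnt : stb_vorbis.floor_count mem' g.f = stb_vorbis.floor_count mem g.f := by
    simp only [vacc, voff]
    exact hF.i32 _ (by omega) (by omega) (by omega)
  -- the windows of `*f` that `Mid` reads
  have hobj : ∀ (ws' : Wins), (∀ w, w ∈ ws' → w.2 ≤ 1808 ∧
      (w.2 ≤ 48 ∨ (56 ≤ w.1 ∧ w.2 ≤ 84) ∨ (96 ≤ w.1 ∧ w.2 ≤ 136) ∨ (144 ≤ w.1 ∧ w.2 ≤ 1484) ∨ (1749 ≤ w.1 ∧ w.2 ≤ 1752) ∨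
        1784 ≤ w.1)) → ObjEq ws' mem g.f mem' g.f := by
    intro ws' hw'
    apply ObjEq.of_sameExcept hs
    · intro w hw
      have := (hw' w hw).1
      omega
    · intro w hw s hs'
      have k0 := hw' w hw
      rcases hws s hs' with k | k | k | k | k | k | k <;> omega
  have hmidw : ObjEq (Mid.winsAt 5 6) mem g.f mem' g.f := by
    apply hobj
    intro w hw
    have eh : Mid.hi 5 = 176 := by decide
    have er : restFrom 6 = 320 := by decide
    simp only [Mid.winsAt, eh, er, List.mem_cons, List.mem_nil_iff, or_false] at hw
    rcases hw with rfl | rfl | rfl | rfl | rfl | rfl <;> simp only [] <;> omega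
  have harw : ObjEq ArenaFields.wins mem g.f mem' g.f := by
    apply hobj
    intro w hw
    simp only [ArenaFields.wins, List.mem_cons, List.mem_nil_iff, or_false] at hw
    subst hw
    simp only []
    omega
  -- every block of the snapshot `A5` is kept
  have hkept : ∀ B, A5.Blk B → B.Kept mem mem' := by
    intro B hB
    have hBA : A.1.Blk B := hB.mono h.mid.extc
    have hd := h.mid.arena.old_disjoint_since h.mid.extc hB h.blk
    have hin := arena_inside h.mid.arena hBA
    have hoff := h.mid.arena.blk_off_stack hBA
    simp only [vblock] at hd
    apply Block.Kept.of_sameExcept hs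
    · intro w hw
      rcases hws w hw with k | k | k | k | k | k | k <;> omega
    · omega
  have hconsts : SDFrameConsts 5 mem' g.R :=
    h.mid.consts.frame (hE.mono (by omega) (by omega)) (by omega)
  have hmid : Mid g 5 5 6 A5 A mem' :=
    h.mid.frame hmidw hkept hconsts (fun h6 => absurd h6 (by omega)) hun (h.mid.arena.transfer harw) hbits
  -- the table `log2_4` reads the same
  have hglob : (Block.mk 0x120640 16) ∈ globalBlocks := by
    unfold globalBlocks
    exact List.mem_cons_of_mem _ (List.mem_cons_of_mem _ List.mem_cons_self)
  have hout := h.hand.outside _ (List.mem_cons_of_mem _ (List.mem_cons_of_mem _ hglob))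
  have hlog : Mem.EqOn 0x120640 0x120650 mem mem' := by
    simp only [] at hout
    apply hs.eqOn
    intro w hw
    rcases hws w hw with k | k | k | k | k | k | k <;> omega
  exact
    { entry := h.entry, hand := h.hand, offText := h.offText, ext := h.ext, callers := h.callers
      shadowIdx := by rw [hE.u64 _ (by omega) (by omega) hR64]; exact h.shadowIdx
      saved_rbx := by rw [hE.u64 _ (by omega) (by omega) hR64]; exact h.saved_rbx
      saved_rbp := by rw [hE.u64 _ (by omega) (by omega) hR64]; exact h.saved_rbp
      saved_r12 := by rw [hE.u64 _ (by omega) (by omega) hR64]; exact h.saved_r12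
      saved_r13 := by rw [hE.u64 _ (by omega) (by omega) hR64]; exact h.saved_r13
      saved_r14 := by rw [hE.u64 _ (by omega) (by omega) hR64]; exact h.saved_r14
      saved_r15 := by rw [hE.u64 _ (by omega) (by omega) hR64]; exact h.saved_r15
      saved_ra := by rw [hE.u64 _ (by omega) (by omega) hR64]; exact h.saved_ra
      shadow := h.shadow.untouched hun
      sh7 := by
        intro j hj
        have e1 : Vorbis.Globals.log2_4.beg = 0x120640 := rfl
        rw [e1]
        have := hlog.u8 (0x120640 + j) (by omega) (by omega) (by omega)
        have e' : mem'.readLE (UInt64.ofNat (0x120640 + j)) 1 = mem.readLE (UInt64.ofNat (0x120640 + j)) 1 := this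
        rw [e']
        have := h.sh7 j hj
        rw [e1] at this
        exact this
      same := by
        apply h.same.step_same hs
        intro w hw a h1 h2
        have eB := h.ext.B
        have eL := h.ext.L
        have ef : (g.e.reg .rdi).toNat = g.f := rfl
        unfold footprint writes
        rcases hws w hw with k | k | k | k | k | k | k
        · exact ⟨_, List.mem_cons_self, by simp only [depth]; omega, by simp only []; omega⟩
        all_goals first
          | exact ⟨_, List.mem_cons_of_mem _ List.mem_cons_self, by simp only [vblock, voff]; omega,
              by simp only [vblock, voff]; omega⟩
          | exact ⟨_, List.mem_cons_of_mem _ (List.mem_cons_of_mem _ (List.mem_cons_of_mem _ List.mem_cons_self)),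
              by simp only []; omega, by simp only []; omega⟩
      mid := hmid
      cfg := by rw [ecfg]; exact h.cfg
      cnt := by rw [ecnt]; exact h.cnt
      blk := h.blk
      lt := h.lt }

/-- **Stores off `*f`** (pushes of return addresses, stores into the floor element) keep `Bits f`. -/
theorem Pt.bits_off (h : Pt u₀ g i A5 A fc n mem) {ws : List Span} (hs : Mem.SameExcept ws mem mem')
    (hws : ∀ w, w ∈ ws → WinOff g (fc + 1596 * i) w) : Bits (g.Blk A) g.len mem' g.f := by
  obtain ⟨⟨r1, r2, r3, r4⟩, ⟨f1, f2, f3, f4⟩, ⟨c1, c2, c3, c4, c5⟩, c6⟩ := h.where_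
  apply h.mid.bits.frame_fields
  apply Bits.SameFields.of_sameExcept hs
  · intro w hw
    rcases hws w hw with k | k <;> omega
  · intro w hw
    rcases hws w hw with k | k <;> omega
  · intro w hw
    rcases hws w hw with k | k <;> omega
  · intro w hw
    rcases hws w hw with k | k <;> omega

/-- **A check site in `*f`**: `k` bytes at `b` inside the decoder object, in a memory with the same shadow. -/
theorem Pt.acc_obj (h : Pt u₀ g i A5 A fc n mem) {mem'' : Mem} (hun : ShadowUntouched mem mem'') (b : Word) (k : Nat)
    (hk : 1 ≤ k) (h1 : g.f ≤ b.toNat) (h2 : b.toNat + k ≤ g.f + 1808) : AccSmall k mem'' b := by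
  have hl : LiveIn A.2 g.frames' g.f Off.sizeof.stb_vorbis := h.hand.obj.mono (frames'_sub g A.2)
  refine hl.accSmall h.shadow hun b k hk h1 ?_
  simp only [voff]
  exact h2

/-- **A check site in the floor element** `[fc + 1596·i, + 1596)`: inside the floor block, a live object (AR6). -/
theorem Pt.acc_elem (h : Pt u₀ g i A5 A fc n mem) {mem'' : Mem} (hun : ShadowUntouched mem mem'') (b : Word) (k : Nat)
    (hk : 1 ≤ k) (h1 : fc + 1596 * i ≤ b.toNat) (h2 : b.toNat + k ≤ fc + 1596 * i + 1596) : AccSmall k mem'' b := by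
  obtain ⟨_, _, _, c6⟩ := h.where_
  have hl : LiveIn A.2 g.frames' fc (1596 * n.toNat) := liveIn_of_arenaBlk h.mid.arena h.blk.1
  exact hl.accSmall h.shadow hun b k hk (by omega) (by omega)

/-- The shadow clause of a callee's precondition at the state right after a `call` from the steady stack pointer. -/
theorem Pt.shadowPre (h : Pt u₀ g i A5 A fc n mem) {s : State} (hrsp : (s.reg .rsp).toNat + 8 = g.R)
    (hun : ShadowUntouched mem s.mem) : ShadowPre A.2 g.frames' s := by
  refine ⟨?_, h.offText⟩
  rw [hrsp]
  exact h.shadow.untouched hun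

/-- **The precondition of `get_bits(f, n)`** at a call of the segment. -/
theorem Pt.readerPre (h : Pt u₀ g i A5 A fc n mem) {s : State} (hrsp : (s.reg .rsp).toNat + 8 = g.R)
    (hun : ShadowUntouched mem s.mem) (hrdi : (s.reg .rdi).toNat = g.f) (hbits : Bits (g.Blk A) g.len s.mem g.f) :
    ReaderPre A.2 g.frames' (g.Blk A) g.len s := by
  refine ⟨h.shadowPre hrsp hun, ?_, ?_⟩
  · rw [hrdi]
    exact readerEnv_mid h.hand h.mid
  · rw [hrdi]
    exact hbits

/-- **The precondition of `error(f, e)`** at the segment's last call. -/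
theorem Pt.errorPre (h : Pt u₀ g i A5 A fc n mem) {s : State} (hrsp : (s.reg .rsp).toNat + 8 = g.R)
    (hun : ShadowUntouched mem s.mem) (hrdi : (s.reg .rdi).toNat = g.f) : (error.spec A.2 g.frames').pre s := by
  refine ⟨h.shadowPre hrsp hun, ?_⟩
  rw [hrdi]
  exact h.hand.obj.mono (frames'_sub g A.2)

/-- The steady stack pointer as a word: `addr R = rsp₀ − 1480`. -/
theorem Pt.rsp_eq (h : Pt u₀ g i A5 A fc n mem) : addr g.R = g.e.reg .rsp - 1480 := by
  obtain ⟨⟨r1, r2, r3, r4⟩, _, _, _⟩ := h.where_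
  have e : g.RA = (g.e.reg .rsp).toNat := rfl
  apply UInt64.toNat_inj.mp
  rw [toNat_addr _ (by omega)]
  have hle : (1480 : UInt64) ≤ g.e.reg .rsp := by
    rw [UInt64.le_iff_toNat_le]
    have : (1480 : UInt64).toNat = 1480 := rfl
    omega
  rw [UInt64.toNat_sub_of_le _ _ hle]
  have : (1480 : UInt64).toNat = 1480 := rfl
  omega

/-- **THE EXIT**: at the epilogue 0x113b22 with eax = 0, the point gives `AtERR` (SD.ERR from `Mid`: H2, H3, H5 from the zero rest). -/
theorem Pt.atERR (h : Pt u₀ g i A5 A fc n mem) {w : State} (hmem : w.mem = mem) (hrip : w.rip = pc_ERR)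
    (hrsp : w.reg .rsp = g.e.reg .rsp - 1480) (hcode : CodeOK u₀ w.mem) (hinv : abiInv w)
    (hrax : (w.reg .rax).toNat % 2 ^ 32 = 0) : AtERR u₀ g w := by
  subst hmem
  refine ⟨A, ?_, h.hand, Or.inl ⟨hrax, ?_⟩⟩
  · exact
      { entry := h.entry, rip := hrip, rsp := by rw [hrsp]; exact h.rsp_eq.symm, shadowIdx := h.shadowIdx,
        saved_rbx := h.saved_rbx, saved_rbp := h.saved_rbp, saved_r12 := h.saved_r12, saved_r13 := h.saved_r13,
        saved_r14 := h.saved_r14, saved_r15 := h.saved_r15, saved_ra := h.saved_ra, code := hcode, inv := hinv,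
        shadow := h.shadow, offText := h.offText, ext := h.ext, callers := h.callers, sh7 := h.sh7, same := h.same }
  · exact h.mid.failed (by omega) (h.mid.h2_null (by omega) _) (h.mid.h3_null (by omega) _) (h.mid.h5_null (by omega) _)

/-- **THE ASSERTION AT THE CUT POINTS INSIDE THE SEGMENT** (after each `get_bits` returned, and at the head of loop 3977): the point
for the state's memory; rip; the steady stack pointer; `rbp = f`; `r12 = g(i)`, the floor element, as a word `gw`; the text; DF and
the MXCSR masks. -/
structure In3 (u₀ : State) (g : Ghost) (i : Nat) (A5 : Arena) (A : Arena × List Obj) (fc : Nat) (n : Int) (gw : Word)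
    (pc : Word) (v : State) : Prop where
  pt : Pt u₀ g i A5 A fc n v.mem
  rip : v.rip = pc
  rsp : v.reg .rsp = g.e.reg .rsp - 1480
  rbp : v.reg .rbp = g.e.reg .rdi
  r12 : v.reg .r12 = gw
  elem : gw.toNat = fc + 1596 * i
  code : CodeOK u₀ v.mem
  inv : abiInv v

/-- **THE ASSERTION INSIDE LOOP 3977** (`for (j = 0; j < g->number_of_books; ++j)`; head `cut201`, and `cut202` after the body's
`get_bits`): `In3` and `ebx = j ≤ b` (`b = 255` at the head; `254` in the body, where `j < number_of_books ≤ 255`). -/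
structure In3L (u₀ : State) (g : Ghost) (i : Nat) (A5 : Arena) (A : Arena × List Obj) (fc : Nat) (n : Int) (gw : Word)
    (j b : Nat) (pc : Word) (v : State) : Prop where
  base : In3 u₀ g i A5 A fc n gw pc v
  rbx : v.reg .rbx = UInt64.ofNat j
  jle : j ≤ b

/-- The loop counter `j ≤ 255` in `ebx`, as a number. -/
theorem part32_counter (j : Nat) (hj : j ≤ 255) : (Word.part .w32 (UInt64.ofNat j)).toNat = j := by
  rw [Vorbis.toNat_part32, UInt64.toNat_ofNat']
  omega

/-- `movsxd r14, ebx` of the loop counter `j ≤ 255` is `j`. -/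
theorem sext_counter (j : Nat) (hj : j ≤ 255) :
    (Word.ofBV (BitVec.signExtend 64 (Word.part .w32 (UInt64.ofNat j)))).toNat = j := by
  have hp := part32_counter j hj
  rw [toNat_sext32 _ (by omega)]
  exact hp

/-- `add ebx, 1` of the loop counter `j ≤ 254` is `j + 1`. -/
theorem counter_succ (j : Nat) (hj : j ≤ 254) :
    Word.ofBV (Word.part .w32 (UInt64.ofNat j) + 1#32) = UInt64.ofNat (j + 1) := by
  have hp := part32_counter j (by omega)
  apply UInt64.toNat_inj.mp
  rw [Vorbis.toNat_ofBV32, BitVec.toNat_add, hp, UInt64.toNat_ofNat']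
  have : (1#32).toNat = 1 := rfl
  omega

/-- **The loop test `cmp eax, ebx ; jle exit` not taken** (`eax` = the zero-extended byte `number_of_books`, `ebx = j ≤ 255`):
`j < number_of_books ≤ 255`, so `j ≤ 254`. -/
theorem counter_lt (x j : Nat) (hj : j ≤ 255)
    (h : ¬ (BitVec.zeroExtend 32 (BitVec.ofNat 8 x)).toInt ≤ (Word.part .w32 (UInt64.ofNat j)).toInt) : j ≤ 254 := by
  have hp := part32_counter j hj
  have hb : (BitVec.ofNat 8 x).toNat < 256 := (BitVec.ofNat 8 x).isLt
  have hz : (BitVec.zeroExtend 32 (BitVec.ofNat 8 x)).toNat = (BitVec.ofNat 8 x).toNat := by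
    rw [BitVec.toNat_setWidth]
    omega
  rw [BitVec.toInt_eq_toNat_cond, BitVec.toInt_eq_toNat_cond, hz, hp] at h
  have e32 : Width.w32.bits = 32 := rfl
  rw [e32] at h
  rw [if_pos (by omega), if_pos (by omega)] at h
  omega

/-- **`error` stored `f->error`** (`[f + 140, f + 144)`) and pushes went below `R`: `Bits f` is kept. -/
theorem Pt.bits_err (h : Pt u₀ g i A5 A fc n mem) {ws : List Span} (hs : Mem.SameExcept ws mem mem')
    (hws : ∀ w, w ∈ ws → (g.RA - 1888 ≤ w.lo ∧ w.hi ≤ g.R) ∨ (g.f + 136 ≤ w.lo ∧ w.hi ≤ g.f + 144)) :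
    Bits (g.Blk A) g.len mem' g.f := by
  obtain ⟨⟨r1, r2, r3, r4⟩, ⟨f1, f2, f3, f4⟩, _, _⟩ := h.where_
  apply h.mid.bits.frame_fields
  apply Bits.SameFields.of_sameExcept hs
  · intro w hw
    rcases hws w hw with k | k <;> omega
  · intro w hw
    rcases hws w hw with k | k <;> omega
  · intro w hw
    rcases hws w hw with k | k <;> omega
  · intro w hw
    rcases hws w hw with k | k <;> omega

/-- **`g = &f->floor_config[i]`** as the code computes it (`movsxd r12, [i] ; imul r12, r12, 0x63c ; add r12, [f + 0x138]`), for
`i < 64` and a floor block inside the data space: the number `fc + 1596·i`. -/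
theorem elem_addr (i fc : Nat) (hi : i < 64) (hfc : fc + 1596 * i ≤ 0xC00000) :
    (Word.ofBV (BitVec.signExtend 64 (BitVec.ofNat 32 i)) * 1596 + UInt64.ofNat fc).toNat = fc + 1596 * i := by
  have h32 : (BitVec.ofNat 32 i).toNat = i := by
    rw [BitVec.toNat_ofNat]
    omega
  have hs : (Word.ofBV (BitVec.signExtend 64 (BitVec.ofNat 32 i))).toNat = i := by
    rw [toNat_sext32 _ (by omega)]
    exact h32
  have h1596 : (1596 : UInt64).toNat = 1596 := rfl
  rw [UInt64.toNat_add, UInt64.toNat_mul, hs, h1596, UInt64.toNat_ofNat']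
  omega

end Vorbis.Spec.start_decoder_F3
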